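-- pv_equiv track=rewrite | github.com/ram677/gfg_pod | Problem_of_the_Day/maximum_people_visible_in_a_line.py | maxPeople
-- ===== SOURCE A (Python) =====
-- def maxPeople(arr):
--     n = len(arr)
--     # Initialize boundaries
--     # left[i] stores the index of the nearest person to the left with height >= arr[i]
--     left = [-1] * n
--     # right[i] stores the index of the nearest person to the right with height >= arr[i]
--     right = [n] * n
--
--     # 1. Find Previous Greater or Equal Element (Left Boundaries)
--     stack = []
--     for i in range(n):
--         # Remove people strictly smaller than current person
--         # The first person remaining is the nearest one >= current
--         while stack and arr[stack[-1]] < arr[i]: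
--             stack.pop()
--
--         if stack:
--             left[i] = stack[-1]
--
--         stack.append(i)
--
--     # 2. Find Next Greater or Equal Element (Right Boundaries)
--     stack = []
--     for i in range(n - 1, -1, -1):
--         # Remove people strictly smaller than current person
--         while stack and arr[stack[-1]] < arr[i]:
--             stack.pop()
--
--         if stack:
--             right[i] = stack[-1]
--
--         stack.append(i)
--
--     # 3. Calculate max visible people
--     max_visible = 0
--     for i in range(n):
--         # The range (left[i], right[i]) contains people strictly smaller than arr[i]
--         # visible count = (right boundary) - (left boundary) - 1
--         current_visible = right[i] - left[i] - 1
--         if current_visible > max_visible: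
--             max_visible = current_visible
--
--     return max_visible
-- ===== SOURCE B (Python) =====
-- def maxPeople(arr):
--     n = len(arr)
--     best = 0
--     for i in range(n):
--         # expand left: l-1 is the nearest index with height >= arr[i]
--         l = i
--         while l > 0 and arr[l - 1] < arr[i]:
--             l -= 1
--         # expand right: r+1 is the nearest index with height >= arr[i]
--         r = i
--         while r < n - 1 and arr[r + 1] < arr[i]:
--             r += 1
--         best = max(best, r - l + 1)
--     return best
-- ===== Notes on version B (the rewrite author's own statement) =====
-- stated objective: simpler
-- what changed: Replaces the two monotonic-stack passes and the left/right boundary arrays with a single pass that, for each index, expands a window outward by direct local scanning (no stacks, no auxiliary arrays).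
import Mathlib
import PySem

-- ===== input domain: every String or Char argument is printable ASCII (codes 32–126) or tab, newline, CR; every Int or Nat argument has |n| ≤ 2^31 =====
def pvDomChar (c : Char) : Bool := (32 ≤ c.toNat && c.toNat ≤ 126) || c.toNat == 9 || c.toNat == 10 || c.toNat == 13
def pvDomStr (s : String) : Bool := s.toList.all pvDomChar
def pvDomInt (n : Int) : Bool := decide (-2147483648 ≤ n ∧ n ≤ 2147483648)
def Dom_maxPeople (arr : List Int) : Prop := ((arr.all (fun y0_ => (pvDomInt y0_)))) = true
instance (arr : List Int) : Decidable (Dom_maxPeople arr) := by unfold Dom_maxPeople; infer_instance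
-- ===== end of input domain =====

-- B replaces A's two monotonic-stack passes and boundary arrays by per-index outward window
-- expansion (no stacks, no auxiliary arrays): simpler, not faster (O(n^2) vs O(n)).

-- ===== PORT A =====
-- A's inner while loop, `while stack and arr[stack[-1]] < arr[i]: stack.pop()` (list head = stack top)
def popA (arr : List Int) (x : Int) : List Int → List Int
  | [] => []
  | j :: stack => if PySem.List.pyGetD arr j 0 < x then popA arr x stack else j :: stack

-- A's boundary-pass loop body, textually shared by passes 1 and 2:
-- `for i in idxs: <pop>; if stack: bound[i] = stack[-1]; stack.append(i)`
-- (every i comes from the range, 0 ≤ i < len(bound), so `bound[i] =` is `List.set i.toNat`)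
def passA (arr : List Int) (idxs : List Int) (bound : List Int) (stack : List Int) :
    List Int × List Int :=
  match idxs with
  | [] => (bound, stack)
  | i :: rest =>
      let stack' := popA arr (PySem.List.pyGetD arr i 0) stack
      let bound' := match stack' with
        | [] => bound
        | j :: _ => bound.set i.toNat j
      passA arr rest bound' (i :: stack')

def maxPeople (arr : List Int) : Int :=
  let n : Int := arr.length
  let left := List.replicate arr.length (-1 : Int)
  let right := List.replicate arr.length n
  let left := (passA arr (PySem.List.pyRange 0 n 1) left []).1
  let right := (passA arr (PySem.List.pyRange (n - 1) (-1) (-1)) right []).1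
  (PySem.List.pyRange 0 n 1).foldl (fun max_visible i =>
    let current_visible := PySem.List.pyGetD right i 0 - PySem.List.pyGetD left i 0 - 1
    if current_visible > max_visible then current_visible else max_visible) 0

-- ===== PORT B =====
-- B's left expansion: `l = i; while l > 0 and arr[l-1] < arr[i]: l -= 1`
def expandL (arr : List Int) (x : Int) (l : Int) : Int :=
  if 0 < l ∧ PySem.List.pyGetD arr (l - 1) 0 < x then expandL arr x (l - 1) else l
termination_by l.toNat
decreasing_by omega

-- B's right expansion: `r = i; while r < n - 1 and arr[r+1] < arr[i]: r += 1`
def expandR (arr : List Int) (n : Int) (x : Int) (r : Int) : Int :=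
  if r < n - 1 ∧ PySem.List.pyGetD arr (r + 1) 0 < x then expandR arr n x (r + 1) else r
termination_by (n - 1 - r).toNat
decreasing_by omega

def maxPeople_alt (arr : List Int) : Int :=
  let n : Int := arr.length
  (PySem.List.pyRange 0 n 1).foldl (fun best i =>
    let l := expandL arr (PySem.List.pyGetD arr i 0) i
    let r := expandR arr n (PySem.List.pyGetD arr i 0) i
    max best (r - l + 1)) 0

-- ===== PRECONDITION & SPEC =====
def Spec_maxPeople (arr : List Int) (out : Int) : Prop := out = maxPeople_alt arr
instance (arr : List Int) (out : Int) : Decidable (Spec_maxPeople arr out) := by unfold Spec_maxPeople; infer_instance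

-- ===== CLAIM (what is proved, stated in full; the proofs are below) =====
def Claim_equal_maxPeople : Prop := ∀ (arr : List Int), Dom_maxPeople arr → Spec_maxPeople arr (maxPeople arr)

-- ===== LEMMAS AND PROOFS =====

-- `arr[k]` for an in-range index (abbreviation used only by the proofs)
def gA (arr : List Int) (k : Int) : Int := PySem.List.pyGetD arr k 0

-- v is the nearest index left of i with height ≥ arr[i] (-1 if none)
def nearL (arr : List Int) (i v : Int) : Prop :=
  (v = -1 ∨ (0 ≤ v ∧ v < i ∧ gA arr i ≤ gA arr v)) ∧
  ∀ k, v < k → k < i → gA arr k < gA arr i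

-- v is the nearest index right of i with height ≥ arr[i] (n if none)
def nearR (arr : List Int) (n i v : Int) : Prop :=
  (v = n ∨ (i < v ∧ v < n ∧ gA arr i ≤ gA arr v)) ∧
  ∀ k, i < k → k < v → gA arr k < gA arr i

lemma nearL_unique {arr : List Int} {i v1 v2 : Int}
    (h1 : nearL arr i v1) (h2 : nearL arr i v2) : v1 = v2 := by
  by_contra hne
  rcases lt_or_gt_of_ne hne with hlt | hlt
  · rcases h2.1 with h | ⟨h0, hi, hg⟩
    · rcases h1.1 with h' | ⟨h0', _, _⟩ <;> omega
    · exact absurd (h1.2 v2 hlt hi) (by omega)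
  · rcases h1.1 with h | ⟨h0, hi, hg⟩
    · rcases h2.1 with h' | ⟨h0', _, _⟩ <;> omega
    · exact absurd (h2.2 v1 hlt hi) (by omega)

lemma nearR_unique {arr : List Int} {n i v1 v2 : Int} (_hn : i < n)
    (h1 : nearR arr n i v1) (h2 : nearR arr n i v2) : v1 = v2 := by
  by_contra hne
  rcases lt_or_gt_of_ne hne with hlt | hlt
  · rcases h1.1 with h | ⟨hi, h0, hg⟩
    · rcases h2.1 with h' | ⟨_, h0', _⟩ <;> omega
    · exact absurd (h2.2 v1 hi hlt) (by omega)
  · rcases h2.1 with h | ⟨hi, h0, hg⟩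
    · rcases h1.1 with h' | ⟨_, h0', _⟩ <;> omega
    · exact absurd (h1.2 v2 hi hlt) (by omega)

lemma expandL_near (arr : List Int) (i : Int) :
    ∀ (m : Nat) (l : Int), l.toNat = m → 0 ≤ l → l ≤ i →
    (∀ k, l ≤ k → k < i → gA arr k < gA arr i) →
    nearL arr i (expandL arr (gA arr i) l - 1) := by
  intro m
  induction m using Nat.strong_induction_on with
  | _ m ih =>
    intro l hm h0 hli hinv
    rw [expandL]
    split
    · next hc =>
      exact ih (l - 1).toNat (by omega) (l - 1) rfl (by omega) (by omega)
        (fun k hk hk' => by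
          rcases eq_or_lt_of_le hk with h | h
          · exact h ▸ hc.2
          · exact hinv k (by omega) hk')
    · next hc =>
      constructor
      · by_cases hl0 : l = 0
        · left; omega
        · right
          refine ⟨by omega, by omega, ?_⟩
          have : ¬ (gA arr (l - 1) < gA arr i) := fun hlt => hc ⟨by omega, hlt⟩
          omega
      · intro k hk hk'
        exact hinv k (by omega) hk'

lemma expandR_near (arr : List Int) (n i : Int) :
    ∀ (m : Nat) (r : Int), (n - 1 - r).toNat = m → i ≤ r → r ≤ n - 1 →
    (∀ k, i < k → k ≤ r → gA arr k < gA arr i) →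
    nearR arr n i (expandR arr n (gA arr i) r + 1) := by
  intro m
  induction m using Nat.strong_induction_on with
  | _ m ih =>
    intro r hm hir hr hinv
    rw [expandR]
    split
    · next hc =>
      exact ih (n - 1 - (r + 1)).toNat (by omega) (r + 1) rfl (by omega) (by omega)
        (fun k hk hk' => by
          rcases eq_or_lt_of_le hk' with h | h
          · exact h ▸ hc.2
          · exact hinv k hk (by omega))
    · next hc =>
      constructor
      · by_cases hrn : r = n - 1
        · left; omega
        · right
          refine ⟨by omega, by omega, ?_⟩
          have : ¬ (gA arr (r + 1) < gA arr i) := fun hlt => hc ⟨by omega, hlt⟩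
          omega
      · intro k hk hk'
        exact hinv k hk (by omega)

-- ----- the monotonic-stack invariant (left pass) -----

def InvL (arr : List Int) (i : Int) (st : List Int) : Prop :=
  st.IsChain (· > ·) ∧ (∀ j ∈ st, 0 ≤ j ∧ j < i) ∧
  (∀ j, 0 ≤ j → j < i → (j ∈ st ↔ ∀ k, j < k → k < i → gA arr k ≤ gA arr j))

lemma popA_suffix (arr : List Int) (x : Int) (st : List Int) : popA arr x st <:+ st := by
  induction st with
  | nil => simp [popA]
  | cons j t ih =>
    rw [popA]
    split
    · exact ih.trans (List.suffix_cons j t)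
    · exact List.suffix_refl _

lemma mem_popA_of_ge {arr : List Int} {x j : Int} {st : List Int}
    (hj : j ∈ st) (hx : x ≤ gA arr j) : j ∈ popA arr x st := by
  induction st with
  | nil => simp at hj
  | cons j0 t ih =>
    rw [popA]
    split
    · next hc =>
      rcases List.mem_cons.mp hj with rfl | hj'
      · exact absurd hc (by simp only [gA] at hx; omega)
      · exact ih hj'
    · exact hj

lemma lt_of_not_mem_popA {arr : List Int} {x j : Int} {st : List Int}
    (hj : j ∈ st) (hnj : j ∉ popA arr x st) : gA arr j < x := by
  induction st with
  | nil => simp at hj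
  | cons j0 t ih =>
    rw [popA] at hnj
    revert hnj
    split
    · next hc =>
      intro hnj
      rcases List.mem_cons.mp hj with rfl | hj'
      · exact hc
      · exact ih hj' hnj
    · intro hnj; exact absurd hj hnj

lemma popA_head_ge {arr : List Int} {x j : Int} {st t : List Int}
    (h : popA arr x st = j :: t) : x ≤ gA arr j := by
  induction st with
  | nil => simp [popA] at h
  | cons j0 t0 ih =>
    rw [popA] at h
    revert h
    split
    · next hc => intro h; exact ih h
    · next hc =>
      intro h
      obtain rfl : j0 = j := by injection h
      simp only [gA]; omega

lemma InvL_step {arr : List Int} {i : Int} {st : List Int}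
    (h : InvL arr i st) (hi : 0 ≤ i) :
    InvL arr (i + 1) (i :: popA arr (gA arr i) st) := by
  obtain ⟨hch, hbd, hmem⟩ := h
  have hsuf := popA_suffix arr (gA arr i) st
  have hsub := hsuf.subset
  have hch' : (popA arr (gA arr i) st).IsChain (· > ·) := hch.sublist hsuf.sublist
  refine ⟨?_, ?_, ?_⟩
  · exact hch'.cons (fun y hy => (hbd y (hsub (List.mem_of_mem_head? hy))).2)
  · intro j hj
    rcases List.mem_cons.mp hj with rfl | hj'
    · omega
    · have := hbd j (hsub hj'); omega
  · intro j hj0 hji1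
    by_cases hji : j = i
    · subst hji
      constructor
      · intro _ k hk hk'; omega
      · intro _; exact List.mem_cons_self
    · have hji' : j < i := by omega
      rw [List.mem_cons]
      constructor
      · rintro (rfl | hjp)
        · omega
        · have hjst := hsub hjp
          have hall := (hmem j hj0 hji').mp hjst
          intro k hk hk1
          by_cases hki : k = i
          · subst hki
            obtain ⟨j0, t, hpop⟩ : ∃ j0 t, popA arr (gA arr k) st = j0 :: t := by
              cases hp : popA arr (gA arr k) st with
              | nil => rw [hp] at hjp; simp at hjp
              | cons a b => exact ⟨a, b, rfl⟩
            have hhead := popA_head_ge hpop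
            by_cases hjj0 : j = j0
            · subst hjj0; exact hhead
            · have hpair := List.isChain_iff_pairwise.mp (hpop ▸ hch')
              have hjt : j ∈ t := by
                rw [hpop] at hjp
                rcases List.mem_cons.mp hjp with rfl | h'
                · exact absurd rfl hjj0
                · exact h'
              have hgt : j0 > j := (List.pairwise_cons.mp hpair).1 j hjt
              have hj0st : j0 ∈ st := hsub (hpop ▸ List.mem_cons_self)
              have := hall j0 hgt (hbd j0 hj0st).2
              omega
          · exact hall k hk (by omega)
      · intro hall
        right
        have hjst : j ∈ st := (hmem j hj0 hji').mpr (fun k hk hk' => hall k hk (by omega))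
        exact mem_popA_of_ge hjst (hall i hji' (by omega))

lemma gapL {arr : List Int} {i : Int} {st : List Int} (h : InvL arr i st) (b : Int)
    (hb : ∀ j ∈ st, b < j → gA arr j < gA arr i) :
    ∀ (m : Nat) (k : Int), (i - k).toNat = m → b < k → 0 ≤ k → k < i → gA arr k < gA arr i := by
  intro m
  induction m using Nat.strong_induction_on with
  | _ m ih =>
    intro k hm hbk h0 hki
    by_cases hk : k ∈ st
    · exact hb k hk hbk
    · have hiff := h.2.2 k h0 hki
      have hnp : ¬ ∀ k', k < k' → k' < i → gA arr k' ≤ gA arr k := fun hp => hk (hiff.mpr hp)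
      push Not at hnp
      obtain ⟨k', h1, h2, h3⟩ := hnp
      have := ih (i - k').toNat (by omega) k' rfl (by omega) (by omega) (by omega)
      omega

lemma popA_nearL {arr : List Int} {i : Int} {st : List Int}
    (h : InvL arr i st) (_hi : 0 ≤ i) :
    nearL arr i (match popA arr (gA arr i) st with | [] => -1 | j :: _ => j) := by
  cases hp : popA arr (gA arr i) st with
  | nil =>
    simp only
    refine ⟨Or.inl rfl, ?_⟩
    intro k hk hk'
    exact gapL h (-1) (fun j hj _ => lt_of_not_mem_popA hj (by simp [hp]))
      (i - k).toNat k rfl hk (by omega) hk'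
  | cons j0 t =>
    simp only
    have hsub := (popA_suffix arr (gA arr i) st).subset
    have hj0st : j0 ∈ st := hsub (hp ▸ List.mem_cons_self)
    have hbd := h.2.1 j0 hj0st
    refine ⟨Or.inr ⟨hbd.1, hbd.2, popA_head_ge hp⟩, ?_⟩
    intro k hk hk'
    refine gapL h j0 ?_ (i - k).toNat k rfl hk (by omega) hk'
    intro j hj hjgt
    apply lt_of_not_mem_popA hj
    intro hjp
    rw [hp] at hjp
    rcases List.mem_cons.mp hjp with rfl | hjt
    · omega
    · have hch' : (j0 :: t).IsChain (· > ·) := hp ▸ (h.1.sublist (popA_suffix arr _ st).sublist)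
      have hpair := List.isChain_iff_pairwise.mp hch'
      have := (List.pairwise_cons.mp hpair).1 j hjt
      omega

lemma pyGetD_set_self {l : List Int} {i : Int} (h0 : 0 ≤ i) (h1 : i < (l.length : Int)) (v : Int) :
    PySem.List.pyGetD (l.set i.toNat v) i 0 = v := by
  rw [PySem.List.pyGetD_of_nonneg _ _ h0]
  rw [List.getD_eq_getElem?_getD]
  rw [List.getElem?_set_self (by simpa using by omega)]
  simp

lemma pyGetD_set_ne {l : List Int} {a : Nat} {k : Int} (h0 : 0 ≤ k) (hne : k ≠ (a : Int)) (v : Int) :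
    PySem.List.pyGetD (l.set a v) k 0 = PySem.List.pyGetD l k 0 := by
  rw [PySem.List.pyGetD_of_nonneg _ _ h0, PySem.List.pyGetD_of_nonneg _ _ h0]
  rw [List.getD_eq_getElem?_getD, List.getD_eq_getElem?_getD]
  rw [List.getElem?_set_ne (by omega)]

lemma pyGetD_replicate {n : Nat} {k : Int} (h0 : 0 ≤ k) (h1 : k < (n : Int)) (v : Int) :
    PySem.List.pyGetD (List.replicate n v) k 0 = v := by
  rw [PySem.List.pyGetD_of_nonneg _ _ h0]
  rw [List.getD_replicate _ (by omega)]

lemma passA_left (arr : List Int) :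
    ∀ (m : Nat) (i : Int) (bound st : List Int),
    ((arr.length : Int) - i).toNat = m → 0 ≤ i → i ≤ (arr.length : Int) →
    InvL arr i st → bound.length = arr.length →
    (∀ k : Int, i ≤ k → k < (arr.length : Int) → PySem.List.pyGetD bound k 0 = -1) →
    (∀ k : Int, i ≤ k → k < (arr.length : Int) →
      nearL arr k (PySem.List.pyGetD ((passA arr (PySem.List.pyRange i (arr.length) 1) bound st).1) k 0)) ∧
    (∀ k : Int, 0 ≤ k → k < i →
      PySem.List.pyGetD ((passA arr (PySem.List.pyRange i (arr.length) 1) bound st).1) k 0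
        = PySem.List.pyGetD bound k 0) := by
  intro m
  induction m using Nat.strong_induction_on with
  | _ m ih =>
    intro i bound st hm h0 hin hInv hlen hinit
    by_cases hlt : i < (arr.length : Int)
    · rw [PySem.List.pyRange_one_cons hlt, passA]
      have hg : PySem.List.pyGetD arr i 0 = gA arr i := rfl
      rw [hg]
      have hnear := popA_nearL hInv h0
      have hstep := InvL_step hInv h0
      cases hp : popA arr (gA arr i) st with
      | nil =>
        rw [hp] at hnear hstep
        obtain ⟨C1, C2⟩ := ih ((arr.length : Int) - (i + 1)).toNat (by omega) (i + 1) bound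
          [i] rfl (by omega) (by omega) hstep hlen
          (fun k hk hk' => hinit k (by omega) hk')
        refine ⟨?_, ?_⟩
        · intro k hik hkn
          rcases eq_or_lt_of_le hik with heq | hik'
          · subst heq
            rw [C2 i h0 (by omega), hinit i (by omega) hkn]
            exact hnear
          · exact C1 k (by omega) hkn
        · intro k h0k hki
          exact C2 k h0k (by omega)
      | cons j0 t =>
        rw [hp] at hnear hstep
        have hlen' : (bound.set i.toNat j0).length = arr.length := by
          simp [hlen]
        obtain ⟨C1, C2⟩ := ih ((arr.length : Int) - (i + 1)).toNat (by omega) (i + 1)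
          (bound.set i.toNat j0) (i :: j0 :: t) rfl (by omega) (by omega) hstep hlen'
          (fun k hk hk' => by
            rw [pyGetD_set_ne (by omega) (by omega) j0]
            exact hinit k (by omega) hk')
        refine ⟨?_, ?_⟩
        · intro k hik hkn
          rcases eq_or_lt_of_le hik with heq | hik'
          · subst heq
            rw [C2 i h0 (by omega), pyGetD_set_self h0 (by omega) j0]
            exact hnear
          · exact C1 k (by omega) hkn
        · intro k h0k hki
          rw [C2 k h0k (by omega), pyGetD_set_ne h0k (by omega) j0]
    · have hi : i = (arr.length : Int) := by omega
      subst hi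
      rw [PySem.List.pyRange_one, show ((arr.length : Int) - (arr.length : Int)).toNat = 0 by omega]
      simp only [List.range_zero, List.map_nil, passA]
      constructor
      · intro k hik hkn
        exact absurd hik (by omega)
      · intro k _ _
        trivial

-- ----- the right pass, mirrored -----

def InvR (arr : List Int) (i : Int) (st : List Int) : Prop :=
  st.IsChain (· < ·) ∧ (∀ j ∈ st, i < j ∧ j < (arr.length : Int)) ∧
  (∀ j, i < j → j < (arr.length : Int) → (j ∈ st ↔ ∀ k, i < k → k < j → gA arr k ≤ gA arr j))

lemma InvR_step {arr : List Int} {i : Int} {st : List Int}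
    (h : InvR arr i st) (hi : i < (arr.length : Int)) :
    InvR arr (i - 1) (i :: popA arr (gA arr i) st) := by
  obtain ⟨hch, hbd, hmem⟩ := h
  have hsuf := popA_suffix arr (gA arr i) st
  have hsub := hsuf.subset
  have hch' : (popA arr (gA arr i) st).IsChain (· < ·) := hch.sublist hsuf.sublist
  refine ⟨?_, ?_, ?_⟩
  · exact hch'.cons (fun y hy => (hbd y (hsub (List.mem_of_mem_head? hy))).1)
  · intro j hj
    rcases List.mem_cons.mp hj with rfl | hj'
    · omega
    · have := hbd j (hsub hj'); omega
  · intro j hj1 hjn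
    by_cases hji : j = i
    · subst hji
      constructor
      · intro _ k hk hk'; omega
      · intro _; exact List.mem_cons_self
    · have hji' : i < j := by omega
      rw [List.mem_cons]
      constructor
      · rintro (rfl | hjp)
        · omega
        · have hjst := hsub hjp
          have hall := (hmem j hji' hjn).mp hjst
          intro k hk hk1
          by_cases hki : k = i
          · subst hki
            obtain ⟨j0, t, hpop⟩ : ∃ j0 t, popA arr (gA arr k) st = j0 :: t := by
              cases hp : popA arr (gA arr k) st with
              | nil => rw [hp] at hjp; simp at hjp
              | cons a b => exact ⟨a, b, rfl⟩
            have hhead := popA_head_ge hpop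
            by_cases hjj0 : j = j0
            · subst hjj0; exact hhead
            · have hpair := List.isChain_iff_pairwise.mp (hpop ▸ hch')
              have hjt : j ∈ t := by
                rw [hpop] at hjp
                rcases List.mem_cons.mp hjp with rfl | h'
                · exact absurd rfl hjj0
                · exact h'
              have hgt : j0 < j := (List.pairwise_cons.mp hpair).1 j hjt
              have hj0st : j0 ∈ st := hsub (hpop ▸ List.mem_cons_self)
              have := hall j0 (hbd j0 hj0st).1 hgt
              omega
          · exact hall k (by omega) hk1
      · intro hall
        right
        have hjst : j ∈ st := (hmem j hji' hjn).mpr (fun k hk hk' => hall k (by omega) hk')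
        exact mem_popA_of_ge hjst (hall i (by omega) hji')

lemma gapR {arr : List Int} {i : Int} {st : List Int} (h : InvR arr i st) (b : Int)
    (hb : ∀ j ∈ st, j < b → gA arr j < gA arr i) :
    ∀ (m : Nat) (k : Int), (k - i).toNat = m → k < b → i < k → k < (arr.length : Int) →
      gA arr k < gA arr i := by
  intro m
  induction m using Nat.strong_induction_on with
  | _ m ih =>
    intro k hm hkb hik hkn
    by_cases hk : k ∈ st
    · exact hb k hk hkb
    · have hiff := h.2.2 k hik hkn
      have hnp : ¬ ∀ k', i < k' → k' < k → gA arr k' ≤ gA arr k := fun hp => hk (hiff.mpr hp)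
      push Not at hnp
      obtain ⟨k', h1, h2, h3⟩ := hnp
      have := ih (k' - i).toNat (by omega) k' rfl (by omega) (by omega) (by omega)
      omega

lemma popA_nearR {arr : List Int} {i : Int} {st : List Int}
    (h : InvR arr i st) (_hi : i < (arr.length : Int)) :
    nearR arr (arr.length : Int) i
      (match popA arr (gA arr i) st with | [] => (arr.length : Int) | j :: _ => j) := by
  cases hp : popA arr (gA arr i) st with
  | nil =>
    simp only
    refine ⟨Or.inl rfl, ?_⟩
    intro k hk hk'
    exact gapR h (arr.length : Int)
      (fun j hj _ => lt_of_not_mem_popA hj (by simp [hp]))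
      (k - i).toNat k rfl (by have := h.2.1 k; omega) hk (by omega)
  | cons j0 t =>
    simp only
    have hsub := (popA_suffix arr (gA arr i) st).subset
    have hj0st : j0 ∈ st := hsub (hp ▸ List.mem_cons_self)
    have hbd := h.2.1 j0 hj0st
    refine ⟨Or.inr ⟨hbd.1, hbd.2, popA_head_ge hp⟩, ?_⟩
    intro k hk hk'
    refine gapR h j0 ?_ (k - i).toNat k rfl hk' hk (by omega)
    intro j hj hjlt
    apply lt_of_not_mem_popA hj
    intro hjp
    rw [hp] at hjp
    rcases List.mem_cons.mp hjp with rfl | hjt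
    · omega
    · have hch' : (j0 :: t).IsChain (· < ·) := hp ▸ (h.1.sublist (popA_suffix arr _ st).sublist)
      have hpair := List.isChain_iff_pairwise.mp hch'
      have := (List.pairwise_cons.mp hpair).1 j hjt
      omega

lemma pyRange_down_cons (i : Int) (hi : 0 ≤ i) :
    PySem.List.pyRange i (-1) (-1) = i :: PySem.List.pyRange (i - 1) (-1) (-1) := by
  rw [PySem.List.pyRange_neg_one_eq_reverse, PySem.List.pyRange_neg_one_eq_reverse]
  rw [show (-1 : Int) + 1 = 0 from rfl, show i - 1 + 1 = i by ring]
  rw [show i + 1 = i + 1 from rfl, PySem.List.pyRange_one_succ_right hi]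
  simp

lemma passA_right (arr : List Int) :
    ∀ (m : Nat) (i : Int) (bound st : List Int),
    (i + 1).toNat = m → i < (arr.length : Int) →
    InvR arr i st → bound.length = arr.length →
    (∀ k : Int, 0 ≤ k → k ≤ i → PySem.List.pyGetD bound k 0 = (arr.length : Int)) →
    (∀ k : Int, 0 ≤ k → k ≤ i →
      nearR arr (arr.length : Int) k
        (PySem.List.pyGetD ((passA arr (PySem.List.pyRange i (-1) (-1)) bound st).1) k 0)) ∧
    (∀ k : Int, i < k → k < (arr.length : Int) →
      PySem.List.pyGetD ((passA arr (PySem.List.pyRange i (-1) (-1)) bound st).1) k 0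
        = PySem.List.pyGetD bound k 0) := by
  intro m
  induction m using Nat.strong_induction_on with
  | _ m ih =>
    intro i bound st hm hin hInv hlen hinit
    by_cases hnn : 0 ≤ i
    · rw [pyRange_down_cons i hnn, passA]
      have hg : PySem.List.pyGetD arr i 0 = gA arr i := rfl
      rw [hg]
      have hnear := popA_nearR hInv hin
      have hstep := InvR_step hInv hin
      cases hp : popA arr (gA arr i) st with
      | nil =>
        rw [hp] at hnear hstep
        obtain ⟨C1, C2⟩ := ih (i - 1 + 1).toNat (by omega) (i - 1) bound
          [i] rfl (by omega) hstep hlen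
          (fun k hk hk' => hinit k hk (by omega))
        refine ⟨?_, ?_⟩
        · intro k h0k hki
          rcases eq_or_lt_of_le hki with heq | hki'
          · subst heq
            rw [C2 k (by omega) (by omega), hinit k h0k (by omega)]
            exact hnear
          · exact C1 k h0k (by omega)
        · intro k hik hkn
          exact C2 k (by omega) hkn
      | cons j0 t =>
        rw [hp] at hnear hstep
        have hlen' : (bound.set i.toNat j0).length = arr.length := by
          simp [hlen]
        obtain ⟨C1, C2⟩ := ih (i - 1 + 1).toNat (by omega) (i - 1)
          (bound.set i.toNat j0) (i :: j0 :: t) rfl (by omega) hstep hlen'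
          (fun k hk hk' => by
            rw [pyGetD_set_ne hk (by omega) j0]
            exact hinit k hk (by omega))
        refine ⟨?_, ?_⟩
        · intro k h0k hki
          rcases eq_or_lt_of_le hki with heq | hki'
          · subst heq
            rw [C2 k (by omega) (by omega), pyGetD_set_self h0k (by omega) j0]
            exact hnear
          · exact C1 k h0k (by omega)
        · intro k hik hkn
          rw [C2 k (by omega) hkn, pyGetD_set_ne (by omega) (by omega) j0]
    · rw [PySem.List.pyRange_neg_one_eq_reverse]
      rw [show (-1 : Int) + 1 = 0 from rfl]
      rw [PySem.List.pyRange_one, show ((i + 1) - 0).toNat = 0 by omega]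
      simp only [List.range_zero, List.map_nil, List.reverse_nil, passA]
      constructor
      · intro k h0k hki
        exact absurd h0k (by omega)
      · intro k _ _
        trivial

-- ===== VERDICT (by name: the statement is the Claim_ definition above) =====
theorem maxPeople_spec : Claim_equal_maxPeople := by
  unfold Claim_equal_maxPeople
  intro arr _
  unfold Spec_maxPeople maxPeople maxPeople_alt
  have hInvL0 : InvL arr 0 [] := by
    refine ⟨by simp, by simp, ?_⟩
    intro j hj0 hj
    exact absurd hj0 (by omega)
  have hInvR0 : InvR arr ((arr.length : Int) - 1) [] := by
    refine ⟨by simp, by simp, ?_⟩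
    intro j hj1 hjn
    exact absurd hj1 (by omega)
  obtain ⟨HL, _⟩ := passA_left arr ((arr.length : Int) - 0).toNat 0
    (List.replicate arr.length (-1)) [] rfl le_rfl (by omega) hInvL0
    (by simp)
    (fun k hk hk' => pyGetD_replicate hk hk' (-1))
  obtain ⟨HR, _⟩ := passA_right arr ((arr.length : Int) - 1 + 1).toNat ((arr.length : Int) - 1)
    (List.replicate arr.length (arr.length : Int)) [] rfl (by omega) hInvR0
    (by simp)
    (fun k hk hk' => pyGetD_replicate hk (by omega) (arr.length : Int))
  apply PySem.List.foldl_congr_mem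
  intro acc x hx
  obtain ⟨hx0, hxn⟩ := PySem.List.mem_pyRange_one.mp hx
  have hbL : nearL arr x (expandL arr (gA arr x) x - 1) :=
    expandL_near arr x x.toNat x rfl hx0 le_rfl
      (fun k hk hk' => absurd hk' (by omega))
  have hbR : nearR arr (arr.length : Int) x (expandR arr (arr.length : Int) (gA arr x) x + 1) :=
    expandR_near arr (arr.length : Int) x ((arr.length : Int) - 1 - x).toNat x rfl le_rfl
      (by omega) (fun k hk hk' => absurd hk' (by omega))
  have e1 := nearL_unique (HL x hx0 hxn) hbL
  have e2 := nearR_unique hxn (HR x hx0 (by omega)) hbR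
  simp only [gA] at e1 e2
  rw [e1, e2]
  have : expandR arr (arr.length : Int) (PySem.List.pyGetD arr x 0) x + 1 -
      (expandL arr (PySem.List.pyGetD arr x 0) x - 1) - 1 =
      expandR arr (arr.length : Int) (PySem.List.pyGetD arr x 0) x -
      expandL arr (PySem.List.pyGetD arr x 0) x + 1 := by ring
  rw [this]
  by_cases h : expandR arr (arr.length : Int) (PySem.List.pyGetD arr x 0) x -
      expandL arr (PySem.List.pyGetD arr x 0) x + 1 ≤ acc
  · rw [if_neg (by omega), max_eq_left h]
  · rw [if_pos (by omega), max_eq_right (by omega)]
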